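-- pv_equiv track=rewrite | github.com/thanujamaheepala/computerVision | canny.py | getGaussianFilteredArray
-- ===== SOURCE A (Python) =====
-- def getGaussianFilteredArray(imageArray):
--     filterArray = [[1,2,3,2,1],[2,7,11,7,2],[3,11,17,11,3],[2,7,11,7,2],[1,2,3,2,1]]
--     divider=121
--     f=len(filterArray)
--     N = len(imageArray)
--     M = len(imageArray[0])
--     result_array = []
--     for x in range(N-(f-1)):
--         result_row = []
--         for y in range(M-(f-1)):
--             result = 0
--             for i in range(x,x+f):
--                 for j in range (y,y+f):
--                     result+= imageArray[i][j]*filterArray[i-x][j-y]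
--             result_row.append(int(result/divider))
--         result_array.append(result_row)
--     return result_array
-- ===== SOURCE B (Python) =====
-- def getGaussianFilteredArray(imageArray):
--     filterArray = [[1,2,3,2,1],[2,7,11,7,2],[3,11,17,11,3],[2,7,11,7,2],[1,2,3,2,1]]
--     N = len(imageArray)
--     M = len(imageArray[0])
--     acc = [[0] * (M - 4) for _ in range(N - 4)]
--     for di in range(5):
--         for dj in range(5):
--             w = filterArray[di][dj]
--             for x in range(N - 4):
--                 row = imageArray[x + di]
--                 arow = acc[x]
--                 for y in range(M - 4):
--                     arow[y] += w * row[y + dj]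
--     return [[int(s / 121) for s in arow] for arow in acc]
-- ===== Notes on version B (the rewrite author's own statement) =====
-- stated objective: alternative
-- what changed: B inverts the loop nest: instead of scanning the 5x5 window per output pixel, it iterates the 25 kernel taps as the outer loops, accumulating each tap's weighted contribution into a pre-allocated output grid, then converts each accumulated sum to a pixel with int(s/121) in one final pass. Pre_ excludes the empty image (A raises IndexError on imageArray[0]) and ragged images with a row shorter than the first, where A raises IndexError.
import Mathlib
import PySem

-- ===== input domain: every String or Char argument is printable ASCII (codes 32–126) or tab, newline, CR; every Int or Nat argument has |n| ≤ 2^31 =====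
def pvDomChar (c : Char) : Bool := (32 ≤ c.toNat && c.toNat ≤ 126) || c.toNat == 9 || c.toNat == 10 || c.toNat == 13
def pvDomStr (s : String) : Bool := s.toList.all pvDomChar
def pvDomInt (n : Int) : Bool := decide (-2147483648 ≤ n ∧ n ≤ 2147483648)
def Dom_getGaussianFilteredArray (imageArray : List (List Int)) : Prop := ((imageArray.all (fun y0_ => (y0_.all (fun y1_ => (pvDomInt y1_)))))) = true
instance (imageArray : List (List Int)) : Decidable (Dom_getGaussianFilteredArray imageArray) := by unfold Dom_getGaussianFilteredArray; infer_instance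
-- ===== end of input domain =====

-- B restructures the convolution: instead of A's per-output-pixel double scan of the 5x5 window,
-- B loops the 25 kernel taps as the OUTER structure, adding each tap's contribution into an
-- accumulator grid, and divides once at the end (objective: alternative decomposition, same cost).

-- ===== PORT A =====
-- imageArray[i][j]; exact under Pre_getGaussianFilteredArray (every access in range there)
def pvPixA (a : List (List Int)) (i j : Int) : Int :=
  PySem.List.pyGetD (PySem.List.pyGetD a i []) j 0

def pvFilter : List (List Int) :=
  [[1,2,3,2,1],[2,7,11,7,2],[3,11,17,11,3],[2,7,11,7,2],[1,2,3,2,1]]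

-- int(result/121): PySem.Int.truncdiv is exact for |result| < 2^53, guaranteed under Dom_
def getGaussianFilteredArray (imageArray : List (List Int)) : List (List Int) :=
  let f : Int := (pvFilter.length : Int)
  let N : Int := (imageArray.length : Int)
  let M : Int := ((PySem.List.pyGetD imageArray 0 []).length : Int)
  (PySem.List.pyRange 0 (N - (f-1)) 1).map (fun x =>
    (PySem.List.pyRange 0 (M - (f-1)) 1).map (fun y =>
      let result : Int :=
        (PySem.List.pyRange x (x+f) 1).foldl (fun r i =>
          (PySem.List.pyRange y (y+f) 1).foldl (fun r j =>
            r + pvPixA imageArray i j * pvPixA pvFilter (i-x) (j-y)) r) 0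
      PySem.Int.truncdiv result 121))

-- ===== PORT B =====
-- int(s/121) is ported as PySem.Int.truncdiv (exact here: |s| < 2^53 under Dom_)
def getGaussianFilteredArray_alt (imageArray : List (List Int)) : List (List Int) :=
  let N : Int := (imageArray.length : Int)
  let M : Int := ((PySem.List.pyGetD imageArray 0 []).length : Int)
  let acc0 : List (List Int) :=
    (PySem.List.pyRange 0 (N-4) 1).map (fun _ =>
      (PySem.List.pyRange 0 (M-4) 1).map (fun _ => (0:Int)))
  let acc : List (List Int) :=
    (PySem.List.pyRange 0 5 1).foldl (fun acc di =>
      (PySem.List.pyRange 0 5 1).foldl (fun acc dj =>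
        let w := pvPixA pvFilter di dj
        acc.mapIdx (fun x arow => arow.mapIdx (fun y s =>
          s + w * pvPixA imageArray ((x:Int)+di) ((y:Int)+dj)))) acc) acc0
  acc.map (fun arow => arow.map (fun s => PySem.Int.truncdiv s 121))

-- ===== PRECONDITION & SPEC =====
-- Pre_ excludes exactly the inputs where Python A raises IndexError: the empty image
-- (imageArray[0]) and, when the loops actually index (N ≥ 5 and M ≥ 5), any row shorter
-- than the first row's length M.
def Pre_getGaussianFilteredArray (imageArray : List (List Int)) : Prop :=
  imageArray ≠ [] ∧
  ((5 ≤ imageArray.length ∧ 5 ≤ (imageArray.headD []).length) →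
    ∀ row ∈ imageArray, (imageArray.headD []).length ≤ row.length)
instance (imageArray : List (List Int)) : Decidable (Pre_getGaussianFilteredArray imageArray) := by unfold Pre_getGaussianFilteredArray; infer_instance

def pvWitness_getGaussianFilteredArray : List (List Int) :=
  [[1,2,3,4,5],[5,4,3,2,1],[1,2,3,4,5],[5,4,3,2,1],[1,2,3,4,5]]

def Spec_getGaussianFilteredArray (imageArray : List (List Int)) (out : List (List Int)) : Prop := out = getGaussianFilteredArray_alt imageArray
instance (imageArray : List (List Int)) (out : List (List Int)) : Decidable (Spec_getGaussianFilteredArray imageArray out) := by unfold Spec_getGaussianFilteredArray; infer_instance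

-- ===== CLAIM (what is proved, stated in full; the proofs are below) =====
def Claim_equal_getGaussianFilteredArray : Prop := ∀ (imageArray : List (List Int)), Dom_getGaussianFilteredArray imageArray → Pre_getGaussianFilteredArray imageArray → Spec_getGaussianFilteredArray imageArray (getGaussianFilteredArray imageArray)

-- ===== LEMMAS AND PROOFS =====
def pvGrid (n m : Int) (s : Int → Int → Int) : List (List Int) :=
  (PySem.List.pyRange 0 n 1).map (fun x => (PySem.List.pyRange 0 m 1).map (fun y => s x y))

lemma pvAcc0_eq (n m : Int) :
    (PySem.List.pyRange 0 n 1).map (fun _ => (PySem.List.pyRange 0 m 1).map (fun _ => (0:Int)))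
      = pvGrid n m (fun _ _ => 0) := rfl

lemma pvGrid_tap (n m : Int) (img : List (List Int)) (s : Int → Int → Int) (w di dj : Int) :
    (pvGrid n m s).mapIdx (fun x arow => arow.mapIdx (fun y v =>
        v + w * pvPixA img ((x:Int)+di) ((y:Int)+dj)))
    = pvGrid n m (fun x y => s x y + w * pvPixA img (x+di) (y+dj)) := by
  apply List.ext_getElem
  · simp [pvGrid]
  · intro i h1 h2
    simp [pvGrid, List.getElem_mapIdx, PySem.List.getElem_pyRange_one]
    apply List.ext_getElem
    · simp
    · intro k h3 h4
      simp [List.getElem_mapIdx, PySem.List.getElem_pyRange_one]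

lemma pvGrid_map (n m : Int) (s : Int → Int → Int) (f : Int → Int) :
    (pvGrid n m s).map (fun arow => arow.map f) = pvGrid n m (fun x y => f (s x y)) := by
  simp [pvGrid, List.map_map, Function.comp]

lemma pvRange_five (a : Int) :
    PySem.List.pyRange a (a+5) 1 = [a, a+1, a+2, a+3, a+4] := by
  rw [PySem.List.pyRange_one]
  simp [add_sub_cancel_left, List.range_succ]

-- ===== VERDICT (by name: the statement is the Claim_ definition above) =====
theorem getGaussianFilteredArray_spec : Claim_equal_getGaussianFilteredArray := by
  intro img _ _
  show getGaussianFilteredArray img = getGaussianFilteredArray_alt img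
  simp only [getGaussianFilteredArray, getGaussianFilteredArray_alt]
  rw [show PySem.List.pyRange 0 5 1 = [0,1,2,3,4] from by decide]
  simp only [List.foldl_cons, List.foldl_nil]
  rw [pvAcc0_eq]
  simp only [pvGrid_tap, pvGrid_map]
  simp only [show ((pvFilter.length : Nat) : Int) = 5 from by norm_num [pvFilter],
             show (5:Int) - 1 = 4 from by norm_num]
  simp only [pvGrid]
  apply List.map_congr_left
  intro x hx
  apply List.map_congr_left
  intro y hy
  rw [pvRange_five x, pvRange_five y]
  simp only [List.foldl_cons, List.foldl_nil]
  simp only [add_sub_cancel_left, sub_self, add_zero]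
  congr 1
  ring
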